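-- pv_equiv track=rewrite | github.com/krohak/Project_Euler | LeetCode/Medium/Longest Increasing Subsequence/save/longest-adagrev.py | createDAG
-- ===== SOURCE A (Python) =====
-- from copy import deepcopy
--
-- def createDAG(nums):
--
--     n = len(nums)
--
--     x = 0
--
--     dag = []
--
--     while x<n:
--         y = 0
--         candidates = []
--         while y<n:
--             if nums[y] > nums[x] and y > x:
--                 candidates.append(1)
--             else:
--                 candidates.append(0)
--             y+=1
--         dag.append(candidates)
--         x+=1
--
--     reverse_dag = deepcopy(dag)
--
--     x = 0
--     while x<n:
--         y = 0
--         while y<n: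
--             reverse_dag[x][y] = dag[y][x]
--             y+=1
--         x+=1
--
--     return reverse_dag
-- ===== SOURCE B (Python) =====
-- def createDAG(nums):
--     n = len(nums)
--     return [[1 if nums[x] > nums[y] and x > y else 0 for y in range(n)]
--             for x in range(n)]
-- ===== Notes on version B (the rewrite author's own statement) =====
-- stated objective: simpler
-- what changed: B builds the transposed matrix directly in one nested comprehension (entry [x][y] = 1 iff nums[x] > nums[y] and x > y), eliminating A's intermediate dag matrix, the deepcopy and the separate transpose pass.
import Mathlib
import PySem

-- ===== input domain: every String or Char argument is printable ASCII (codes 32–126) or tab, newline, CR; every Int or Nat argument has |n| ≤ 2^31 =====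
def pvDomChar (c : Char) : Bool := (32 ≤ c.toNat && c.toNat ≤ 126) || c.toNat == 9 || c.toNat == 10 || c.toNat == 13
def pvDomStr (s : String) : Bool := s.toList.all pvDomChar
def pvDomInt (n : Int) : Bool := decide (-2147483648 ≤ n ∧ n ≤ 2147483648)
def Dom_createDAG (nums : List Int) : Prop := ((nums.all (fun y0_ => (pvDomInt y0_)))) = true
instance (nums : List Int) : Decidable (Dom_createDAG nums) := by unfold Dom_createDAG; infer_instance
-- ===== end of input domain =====

-- B replaces A's build-then-deepcopy-then-transpose with one direct nested comprehension; objective: simpler.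

-- ===== PORT A =====
-- Literal port of A: two while-loops appending 0/1 entries build `dag`; then a copy of
-- `dag` is overwritten element by element with reverse_dag[x][y] = dag[y][x]
-- (in-place assignment modelled by pySetD on the row and on the matrix).
def createDAG (nums : List Int) : List (List Int) :=
  let n : Int := nums.length
  let dag : List (List Int) :=
    (PySem.List.pyRange 0 n 1).foldl (fun dag x =>
      dag ++ [(PySem.List.pyRange 0 n 1).foldl (fun cand y =>
        cand ++ [if PySem.List.pyGetD nums y 0 > PySem.List.pyGetD nums x 0 ∧ y > x
                 then (1 : Int) else 0]) []]) []
  (PySem.List.pyRange 0 n 1).foldl (fun rd x =>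
    (PySem.List.pyRange 0 n 1).foldl (fun rd y =>
      PySem.List.pySetD rd x
        (PySem.List.pySetD (PySem.List.pyGetD rd x []) y
          (PySem.List.pyGetD (PySem.List.pyGetD dag y []) x 0))) rd) dag

-- ===== PORT B =====
-- Port of B: one nested comprehension, entry [x][y] = 1 iff nums[x] > nums[y] and x > y.
def createDAG_alt (nums : List Int) : List (List Int) :=
  (PySem.List.pyRange 0 (nums.length : Int) 1).map (fun x =>
    (PySem.List.pyRange 0 (nums.length : Int) 1).map (fun y =>
      if PySem.List.pyGetD nums x 0 > PySem.List.pyGetD nums y 0 ∧ x > y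
      then (1 : Int) else 0))

-- ===== PRECONDITION & SPEC =====
def Spec_createDAG (nums : List Int) (out : List (List Int)) : Prop := out = createDAG_alt nums
instance (nums : List Int) (out : List (List Int)) : Decidable (Spec_createDAG nums out) := by unfold Spec_createDAG; infer_instance

-- ===== CLAIM (what is proved, stated in full; the proofs are below) =====
def Claim_equal_createDAG : Prop := ∀ (nums : List Int), Dom_createDAG nums → Spec_createDAG nums (createDAG nums)

-- ===== LEMMAS AND PROOFS =====

-- entry of A's `dag` (indices as naturals, comparisons exactly as in the Python condition)
def pvG (nums : List Int) (x y : Nat) : Int :=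
  if PySem.List.pyGetD nums (y : Int) 0 > PySem.List.pyGetD nums (x : Int) 0 ∧ (y : Int) > (x : Int)
  then 1 else 0

-- A's first phase builds the matrix [[pvG x y for y] for x]
lemma dag_eq_map (nums : List Int) :
    ((PySem.List.pyRange 0 (nums.length : Int) 1).foldl (fun dag x =>
      dag ++ [(PySem.List.pyRange 0 (nums.length : Int) 1).foldl (fun cand y =>
        cand ++ [if PySem.List.pyGetD nums y 0 > PySem.List.pyGetD nums x 0 ∧ y > x
                 then (1 : Int) else 0]) []]) [])
    = (List.range nums.length).map (fun x => (List.range nums.length).map (pvG nums x)) := by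
  rw [show (fun (dag : List (List Int)) (x : Int) =>
      dag ++ [(PySem.List.pyRange 0 (nums.length : Int) 1).foldl (fun cand y =>
        cand ++ [if PySem.List.pyGetD nums y 0 > PySem.List.pyGetD nums x 0 ∧ y > x
                 then (1 : Int) else 0]) []]) = (fun dag x => dag ++ [(fun x =>
        (PySem.List.pyRange 0 (nums.length : Int) 1).foldl (fun cand y =>
        cand ++ [if PySem.List.pyGetD nums y 0 > PySem.List.pyGetD nums x 0 ∧ y > x
                 then (1 : Int) else 0]) []) x]) from rfl]
  rw [PySem.List.foldl_append_singleton_eq_map, List.nil_append,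
      PySem.List.pyRange_zero_natCast, List.map_map]
  refine List.map_congr_left (fun x _ => ?_)
  simp only [Function.comp]
  rw [show (fun (cand : List Int) (y : Int) =>
      cand ++ [if PySem.List.pyGetD nums y 0 > PySem.List.pyGetD nums ((x : Nat) : Int) 0 ∧ y > ((x : Nat) : Int)
               then (1 : Int) else 0]) = (fun cand y => cand ++ [(fun y =>
      if PySem.List.pyGetD nums y 0 > PySem.List.pyGetD nums ((x : Nat) : Int) 0 ∧ y > ((x : Nat) : Int)
               then (1 : Int) else 0) y]) from rfl]
  rw [PySem.List.foldl_append_singleton_eq_map, List.nil_append, List.map_map]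
  rfl

-- inner transpose loop: writes entries 0..k-1 of row x, reading only the fixed function h
lemma inner_loop {α : Type} (x : Nat) (h : Nat → α) :
    ∀ (k : Nat) (rd : List (List α)), x < rd.length → k ≤ (rd.getD x []).length →
    (List.range k).foldl (fun rd y => rd.set x ((rd.getD x []).set y (h y))) rd
      = rd.set x ((List.range k).map h ++ (rd.getD x []).drop k) := by
  intro k
  induction k with
  | zero =>
    intro rd hx hk
    simp [List.getD_eq_getElem?_getD, List.getElem?_eq_getElem hx]
  | succ k ih =>
    intro rd hx hk
    rw [List.range_succ, List.foldl_append, List.foldl_cons, List.foldl_nil,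
        ih rd hx (Nat.le_of_succ_le hk)]
    have hget : (rd.set x ((List.range k).map h ++ (rd.getD x []).drop k)).getD x []
        = (List.range k).map h ++ (rd.getD x []).drop k := by
      rw [List.getD_eq_getElem?_getD, List.getElem?_set_self (by simpa using hx)]
      rfl
    rw [hget, List.set_set]
    congr 1
    have hlen : ((List.range k).map h).length = k := by simp
    have hkl : k < (rd.getD x []).length := hk
    rw [List.set_append, hlen]
    simp only [Nat.lt_irrefl, if_false, Nat.sub_self]
    rw [List.drop_eq_getElem_cons hkl, List.set_cons_zero]
    simp

-- outer transpose loop: replaces rows 0..k-1 by the transposed rows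
lemma outer_loop {α : Type} (F : Nat → Nat → α) (n : Nat) :
    ∀ (k : Nat) (rd : List (List α)), rd.length = n → (∀ r ∈ rd, r.length = n) → k ≤ n →
    (List.range k).foldl (fun rd x =>
        (List.range n).foldl (fun rd y => rd.set x ((rd.getD x []).set y (F x y))) rd) rd
      = (List.range k).map (fun x => (List.range n).map (F x)) ++ rd.drop k := by
  intro k
  induction k with
  | zero => intro rd h1 h2 hk; simp
  | succ k ih =>
    intro rd h1 h2 hk
    rw [List.range_succ, List.foldl_append, List.foldl_cons, List.foldl_nil,
        ih rd h1 h2 (Nat.le_of_succ_le hk)]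
    have hprelen : ((List.range k).map (fun x => (List.range n).map (F x))).length = k := by simp
    have hkn : k < n := hk
    have hklt : k < rd.length := by omega
    have hrdk : ((List.range k).map (fun x => (List.range n).map (F x)) ++ rd.drop k).getD k []
        = rd.getD k [] := by
      rw [List.getD_eq_getElem?_getD, List.getElem?_append_right (by omega), hprelen,
          Nat.sub_self, List.getElem?_drop, Nat.add_zero, List.getD_eq_getElem?_getD]
    have hrowlen : (rd.getD k []).length = n := by
      rw [List.getD_eq_getElem?_getD, List.getElem?_eq_getElem hklt]
      exact h2 _ (List.getElem_mem hklt)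
    have hlen2 : ((List.range k).map (fun x => (List.range n).map (F x)) ++ rd.drop k).length = n := by
      simp [hprelen, h1]; omega
    rw [inner_loop k (F k) n _ (by omega) (by rw [hrdk, hrowlen])]
    have hdrop : List.drop n (rd.getD k []) = [] := by rw [← hrowlen, List.drop_length]
    rw [hrdk, hdrop, List.append_nil, List.set_append, hprelen]
    simp only [Nat.lt_irrefl, if_false, Nat.sub_self]
    rw [List.drop_eq_getElem_cons hklt, List.set_cons_zero]
    simp

-- ===== VERDICT (by name: the statement is the Claim_ definition above) =====
theorem createDAG_spec : Claim_equal_createDAG := by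
  intro nums _
  unfold Spec_createDAG createDAG createDAG_alt
  simp only []
  rw [dag_eq_map]
  set n := nums.length with hn
  set M := (List.range n).map (fun x => (List.range n).map (pvG nums x)) with hM
  rw [PySem.List.pyRange_zero_natCast, List.foldl_map]
  have hbody : (fun (rd : List (List Int)) (x : Nat) =>
      (List.map (fun k : Nat => (k : Int)) (List.range n)).foldl (fun rd y =>
        PySem.List.pySetD rd ((x : Nat) : Int)
          (PySem.List.pySetD (PySem.List.pyGetD rd ((x : Nat) : Int) []) y
            (PySem.List.pyGetD (PySem.List.pyGetD M y []) ((x : Nat) : Int) 0))) rd)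
      = (fun rd x => (List.range n).foldl (fun rd y =>
          rd.set x ((rd.getD x []).set y ((M.getD y []).getD x 0))) rd) := by
    funext rd x
    rw [List.foldl_map]
    have : (fun (rd : List (List Int)) (y : Nat) =>
        PySem.List.pySetD rd ((x : Nat) : Int)
          (PySem.List.pySetD (PySem.List.pyGetD rd ((x : Nat) : Int) []) ((y : Nat) : Int)
            (PySem.List.pyGetD (PySem.List.pyGetD M ((y : Nat) : Int) []) ((x : Nat) : Int) 0)))
        = (fun rd y => rd.set x ((rd.getD x []).set y ((M.getD y []).getD x 0))) := by
      funext rd y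
      rw [PySem.List.pyGetD_natCast, PySem.List.pyGetD_natCast, PySem.List.pyGetD_natCast,
          PySem.List.pySetD_natCast, PySem.List.pySetD_natCast]
    rw [this]
  rw [hbody]
  have hMlen : M.length = n := by simp [hM]
  have hMrows : ∀ r ∈ M, r.length = n := by
    intro r hr
    rw [hM] at hr
    obtain ⟨x, _, rfl⟩ := List.mem_map.mp hr
    simp
  rw [outer_loop (fun x y => (M.getD y []).getD x 0) n n M hMlen hMrows (Nat.le_refl n),
      show List.drop n M = [] from by rw [← hMlen, List.drop_length],
      List.append_nil, List.map_map]
  refine List.map_congr_left (fun x hx => ?_)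
  simp only [Function.comp]
  rw [List.map_map]
  refine List.map_congr_left (fun y hy => ?_)
  simp only [Function.comp]
  rw [hM, PySem.List.getD_map_range _ _ _ _ (List.mem_range.mp hy),
      PySem.List.getD_map_range _ _ _ _ (List.mem_range.mp hx)]
  rfl
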